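-- pv_equiv track=rewrite | github.com/park-sy/1day_1git | Programmers/110옮기기.py | solution
-- ===== SOURCE A (Python) =====
-- def solution(s):
--     answer = []
--
--     for word in s:
--         stk = []
--         cnt = 0
--         for w in word:
--             if w == "0" and stk[-2:] == ["1","1"]:
--                 cnt += 1
--                 stk.pop()
--                 stk.pop()
--             else:
--                 stk.append(w)
--         new_word = "".join(stk)
--         for _ in range(cnt):
--             new_word = find(new_word)
--         answer.append(new_word)
--
--
--     return answer
--
-- def find(word):
--     n = len(word)
--     for i in range(n-1,-1,-1):
--         if word[i] == "0":
--             return word[:i+1]+"110"+word[i+1:]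
--
--     return "110"+word
-- ===== SOURCE B (Python) =====
-- def solution(s):
--     return [_minimize(word) for word in s]
--
-- def _minimize(word):
--     stk = []
--     cnt = 0
--     for c in word:
--         if c == "0" and len(stk) >= 2 and stk[-1] == "1" and stk[-2] == "1":
--             cnt += 1
--             del stk[-2:]
--         else:
--             stk.append(c)
--     body = "".join(stk)
--     i = body.rfind("0")
--     return body[:i + 1] + "110" * cnt + body[i + 1:]
-- ===== Notes on version B (the rewrite author's own statement) =====
-- stated objective: alternative
-- what changed: B does the reinsertion with one splice of '110'*cnt after the last '0' found by a single rfind, instead of A's cnt separate find() passes each rescanning and rebuilding the word.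
import Mathlib
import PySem

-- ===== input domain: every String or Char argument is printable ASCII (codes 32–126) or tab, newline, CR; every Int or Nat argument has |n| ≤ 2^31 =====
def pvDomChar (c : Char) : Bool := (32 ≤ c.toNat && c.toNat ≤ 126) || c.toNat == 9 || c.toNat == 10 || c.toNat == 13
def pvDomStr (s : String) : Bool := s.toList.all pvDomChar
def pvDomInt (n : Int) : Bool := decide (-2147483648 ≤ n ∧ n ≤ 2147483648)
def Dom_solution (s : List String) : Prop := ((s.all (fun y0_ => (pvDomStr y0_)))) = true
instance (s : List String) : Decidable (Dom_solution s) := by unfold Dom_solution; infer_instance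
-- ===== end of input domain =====

-- B replaces A's cnt repeated `find` reinsertion passes by one splice of "110"*cnt after the
-- last '0' of the stripped word (objective: alternative — a different reinsertion algorithm).

-- ===== PORT A =====
-- find's loop: i runs n-1, n-2, …, 0; `findGoA w k` is the loop with indices below k left to visit.
-- word[i] for 0 ≤ i < len is w[i]?; word[:i+1]/word[i+1:] with i+1 ≥ 0 are take/drop (PySem.List.slice_to/slice_from) — exact.
def findGoA (w : List Char) : Nat → List Char
  | 0 => ['1', '1', '0'] ++ w                    -- loop fell through: return "110"+word
  | k+1 => if w[k]? = some '0'
           then w.take (k+1) ++ ['1', '1', '0'] ++ w.drop (k+1)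
           else findGoA w k

def findA (w : List Char) : List Char := findGoA w w.length

-- inner stack loop of A; stk[-2:] is PySem.List.slice stk (some (-2)) none;
-- the two `stk.pop()` from the end are dropLast.dropLast — exact: pop() removes the last element.
def stkLoopA : List Char → List Char → Nat → List Char × Nat
  | [], stk, cnt => (stk, cnt)
  | c :: rest, stk, cnt =>
    if c = '0' ∧ PySem.List.slice stk (some (-2)) none = ['1', '1']
    then stkLoopA rest stk.dropLast.dropLast (cnt + 1)
    else stkLoopA rest (stk ++ [c]) cnt

-- `for _ in range(cnt): new_word = find(new_word)`
def applyFindA : Nat → List Char → List Char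
  | 0, w => w
  | n+1, w => applyFindA n (findA w)

-- "".join(stk) of one-character strings is the string of those characters — String.ofList, exact.
def wordA (word : String) : String :=
  let p := stkLoopA word.toList [] 0
  String.ofList (applyFindA p.2 p.1)

def solution (s : List String) : List String :=
  s.foldl (fun answer word => answer ++ [wordA word]) []

-- ===== PORT B =====
-- inner stack loop of B: condition `len(stk) >= 2 and stk[-1] == "1" and stk[-2] == "1"`,
-- `del stk[-2:]` leaves stk[:len-2] = PySem.List.slice stk none (some (-2)).
def stkLoopB : List Char → List Char → Nat → List Char × Nat
  | [], stk, cnt => (stk, cnt)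
  | c :: rest, stk, cnt =>
    if c = '0' ∧ 2 ≤ stk.length ∧ PySem.List.pyGet? stk (-1) = some '1'
             ∧ PySem.List.pyGet? stk (-2) = some '1'
    then stkLoopB rest (PySem.List.slice stk none (some (-2))) (cnt + 1)
    else stkLoopB rest (stk ++ [c]) cnt

-- port of str.rfind("0"): index of the last '0', or -1
def rfind0 (w : List Char) : Int :=
  match w.reverse.findIdx? (· = '0') with
  | some k => (w.length : Int) - 1 - k
  | none => -1

-- body[:i+1] + "110"*cnt + body[i+1:]  (i ≥ -1, so i+1 ≥ 0 and take/drop is exact)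
def wordB (word : String) : String :=
  let p := stkLoopB word.toList [] 0
  let i := rfind0 p.1
  String.ofList (p.1.take (i + 1).toNat ++ (List.replicate p.2 ['1', '1', '0']).flatten
             ++ p.1.drop (i + 1).toNat)

def solution_alt (s : List String) : List String := s.map wordB

-- ===== PRECONDITION & SPEC =====
def Spec_solution (s : List String) (out : List String) : Prop := out = solution_alt s
instance (s : List String) (out : List String) : Decidable (Spec_solution s out) := by unfold Spec_solution; infer_instance

-- ===== CLAIM (what is proved, stated in full; the proofs are below) =====
def Claim_equal_solution : Prop := ∀ (s : List String), Dom_solution s → Spec_solution s (solution s)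

-- ===== LEMMAS AND PROOFS =====

-- the condition of A's stack loop agrees with the condition of B's
lemma cond_eq_aux (t : List Char) (b a : Char) :
    (PySem.List.slice (t ++ [b, a]) (some (-2)) none = ['1', '1']) ↔
    (2 ≤ (t ++ [b, a]).length ∧ PySem.List.pyGet? (t ++ [b, a]) (-1) = some '1'
       ∧ PySem.List.pyGet? (t ++ [b, a]) (-2) = some '1') := by
  rw [PySem.List.slice_from_neg_ofNat _ 2 (by omega),
      PySem.List.pyGet?_neg_ofNat _ 2 (by omega) (by simp)]
  simp [List.drop_left', PySem.List.pyGet?_neg_one]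
  tauto

lemma cond_eq (stk : List Char) :
    (PySem.List.slice stk (some (-2)) none = ['1', '1']) ↔
    (2 ≤ stk.length ∧ PySem.List.pyGet? stk (-1) = some '1'
       ∧ PySem.List.pyGet? stk (-2) = some '1') := by
  match hr : stk.reverse with
  | [] => have : stk = [] := by simpa using congrArg List.reverse hr
          subst this; simp [PySem.List.slice, PySem.List.pyGet?]
  | [a] => have : stk = [a] := by simpa using congrArg List.reverse hr
           subst this
           rw [PySem.List.slice_from_neg_ofNat _ 2 (by omega)]
           simp [PySem.List.pyGet?]
  | a :: b :: r =>
      have : stk = r.reverse ++ [b, a] := by simpa using congrArg List.reverse hr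
      subst this
      exact cond_eq_aux _ _ _

-- popping twice from the end is stk[:-2]
lemma dropLast_dropLast_eq_slice (stk : List Char) :
    stk.dropLast.dropLast = PySem.List.slice stk none (some (-2)) := by
  rw [PySem.List.slice_to_neg_ofNat _ 2 (by omega)]
  simp [List.dropLast_eq_take, List.take_take]
  omega

lemma stkLoop_eq (w stk : List Char) (cnt : Nat) :
    stkLoopA w stk cnt = stkLoopB w stk cnt := by
  induction w generalizing stk cnt with
  | nil => rfl
  | cons c rest ih =>
    simp only [stkLoopA, stkLoopB, cond_eq, dropLast_dropLast_eq_slice]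
    split_ifs <;> exact ih _ _

-- find's downward scan skips indices holding no '0'
lemma findGoA_skip (w : List Char) (k m : Nat) (hmk : m ≤ k)
    (h : ∀ j, m ≤ j → j < k → w[j]? ≠ some '0') :
    findGoA w k = findGoA w m := by
  induction k with
  | zero => have : m = 0 := by omega
            subst this; rfl
  | succ k ih =>
    rcases Nat.eq_or_lt_of_le hmk with rfl | hlt
    · rfl
    · have hne : w[k]? ≠ some '0' := h k (by omega) (by omega)
      rw [findGoA, if_neg hne]
      exact ih (by omega) fun j h1 h2 => h j h1 (by omega)

-- on b ++ c with c zero-free and b empty or ending in '0', find inserts "110" between them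
lemma findA_insert (b c : List Char) (hc : ∀ x ∈ c, x ≠ '0')
    (hb : b = [] ∨ ∃ b', b = b' ++ ['0']) :
    findA (b ++ c) = b ++ ['1', '1', '0'] ++ c := by
  unfold findA
  have hskip : findGoA (b ++ c) (b ++ c).length = findGoA (b ++ c) b.length := by
    apply findGoA_skip _ _ _ (by simp)
    intro j h1 h2 hj
    have h3 : getElem? c (j - b.length) = some '0' := by
      rw [← hj, List.getElem?_append_right h1]
    exact hc '0' (List.mem_of_getElem? h3) rfl
  rw [hskip]
  rcases hb with rfl | ⟨b', rfl⟩
  · rfl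
  · have hlen : (b' ++ ['0']).length = b'.length + 1 := by simp
    rw [hlen, findGoA]
    have hget : getElem? (b' ++ ['0'] ++ c) b'.length = some '0' := by
      rw [List.append_assoc]
      simp
    rw [if_pos hget]
    have ht : (b' ++ ['0'] ++ c).take (b'.length + 1) = b' ++ ['0'] := by
      simp [List.take_append]
    have hd : (b' ++ ['0'] ++ c).drop (b'.length + 1) = c := by
      simp [List.drop_append]
    rw [ht, hd]

-- iterating find cnt times inserts "110"*cnt between b and c
lemma applyFindA_splice (n : Nat) (b c : List Char) (hc : ∀ x ∈ c, x ≠ '0')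
    (hb : b = [] ∨ ∃ b', b = b' ++ ['0']) :
    applyFindA n (b ++ c) = b ++ (List.replicate n ['1', '1', '0']).flatten ++ c := by
  induction n generalizing b with
  | zero => simp [applyFindA]
  | succ n ih =>
    rw [applyFindA, findA_insert b c hc hb,
        ih (b ++ ['1', '1', '0']) (Or.inr ⟨b ++ ['1', '1'], by simp⟩)]
    simp [List.replicate_succ, List.append_assoc]

-- rfind positions the cut exactly at the boundary of the decomposition
lemma rfind0_spec (b c : List Char) (hc : ∀ x ∈ c, x ≠ '0')
    (hb : b = [] ∨ ∃ b', b = b' ++ ['0']) :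
    rfind0 (b ++ c) = (b.length : Int) - 1 := by
  unfold rfind0
  have hnone : c.reverse.findIdx? (· = '0') = none := by
    rw [List.findIdx?_eq_none_iff]
    intro x hx
    simp [hc x (List.mem_reverse.mp hx)]
  rcases hb with rfl | ⟨b', rfl⟩
  · simp [hnone]
  · rw [List.reverse_append, List.reverse_append]
    simp only [List.reverse_singleton]
    rw [List.findIdx?_append, hnone]
    simp [List.findIdx?_cons]
    ring

-- per stripped stack: A's repeated find equals B's single splice
lemma splice_core (stk : List Char) (cnt : Nat) :
    applyFindA cnt stk =
      stk.take (rfind0 stk + 1).toNat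
        ++ (List.replicate cnt ['1', '1', '0']).flatten
        ++ stk.drop (rfind0 stk + 1).toNat := by
  set b : List Char := (stk.reverse.dropWhile (fun x => x ≠ '0')).reverse with hbdef
  set c : List Char := (stk.reverse.takeWhile (fun x => x ≠ '0')).reverse with hcdef
  have hsplit : stk = b ++ c := by
    rw [hbdef, hcdef, ← List.reverse_append, List.takeWhile_append_dropWhile,
        List.reverse_reverse]
  have hc : ∀ x ∈ c, x ≠ '0' := by
    intro x hx
    have := List.mem_takeWhile_imp (List.mem_reverse.mp hx)
    simpa using this
  have hb : b = [] ∨ ∃ b', b = b' ++ ['0'] := by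
    rcases hv : stk.reverse.dropWhile (fun x => x ≠ '0') with _ | ⟨h, t⟩
    · left; rw [hbdef, hv]; rfl
    · right
      have hh : h = '0' := by
        have := List.head?_dropWhile_not (fun x : Char => decide (x ≠ '0')) stk.reverse
        rw [hv] at this
        simpa using this
      exact ⟨t.reverse, by rw [hbdef, hv, hh]; simp⟩
  rw [hsplit, rfind0_spec b c hc hb, applyFindA_splice cnt b c hc hb]
  have : ((b.length : Int) - 1 + 1).toNat = b.length := by omega
  rw [this, List.take_left, List.drop_left]

lemma word_eq (word : String) : wordA word = wordB word := by
  unfold wordA wordB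
  rw [stkLoop_eq]
  exact congrArg String.ofList (splice_core _ _)

-- ===== VERDICT (by name: the statement is the Claim_ definition above) =====
theorem solution_spec : Claim_equal_solution := by
  intro s _
  unfold Spec_solution solution solution_alt
  rw [PySem.List.foldl_append_singleton_eq_map]
  exact List.map_congr_left (fun w _ => word_eq w)
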